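-- pv_equiv track=rewrite | github.com/suhyeon7675/python_algorithm | 2023-06-05/치킨 쿠폰/1_구구.py | solution
-- ===== SOURCE A (Python) =====
-- def solution(chicken):
--     answer = 0
--     coupon = 0
--     while chicken != 0:
--         coupon += chicken % 10
--         chicken //= 10
--         answer += chicken
--     while coupon >= 10:
--         coupon -= 10
--         answer += 1
--         coupon += 1
--     return answer
-- ===== SOURCE B (Python) =====
-- def solution(chicken):
--     # Closed form: exchanging 10 coupons for 1 chicken (which yields a coupon back)
--     # produces (n-1)//9 chickens in total from n coupons (0 for n == 0).
--     if chicken == 0: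
--         return 0
--     return (chicken - 1) // 9
-- ===== Notes on version B (the rewrite author's own statement) =====
-- stated objective: simpler
-- what changed: Replaced A's digit-by-digit while loop and the repeated 10-coupons-for-1 exchange loop by the closed form (chicken-1)//9 (0 for chicken == 0).
import Mathlib
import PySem

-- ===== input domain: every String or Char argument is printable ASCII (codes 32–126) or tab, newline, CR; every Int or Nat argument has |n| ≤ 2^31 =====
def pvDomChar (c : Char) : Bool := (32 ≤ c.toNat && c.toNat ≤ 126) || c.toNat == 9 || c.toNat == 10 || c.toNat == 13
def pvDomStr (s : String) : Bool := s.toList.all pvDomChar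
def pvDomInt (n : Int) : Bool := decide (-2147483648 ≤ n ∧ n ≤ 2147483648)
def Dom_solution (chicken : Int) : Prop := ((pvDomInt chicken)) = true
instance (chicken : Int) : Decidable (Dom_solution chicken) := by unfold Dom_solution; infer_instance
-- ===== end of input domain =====

-- B replaces A's two while loops by the closed form (chicken-1)//9; objective: simpler.

-- ===== PORT A =====
-- first while loop of A: `while chicken != 0: coupon += chicken % 10; chicken //= 10; answer += chicken`
-- fuel-bounded transliteration (fuel only makes the recursion total; it is ample under Pre_)
def solutionLoop1 : Nat → Int → Int → Int → Int × Int
  | 0, _, answer, coupon => (answer, coupon)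
  | fuel + 1, chicken, answer, coupon =>
    if chicken = 0 then (answer, coupon)
    else
      let coupon := coupon + PySem.Int.mod chicken 10
      let chicken := PySem.Int.floordiv chicken 10
      let answer := answer + chicken
      solutionLoop1 fuel chicken answer coupon

-- second while loop of A: `while coupon >= 10: coupon -= 10; answer += 1; coupon += 1`
def solutionLoop2 (coupon answer : Int) : Int :=
  if h : 10 ≤ coupon then
    solutionLoop2 (coupon - 10 + 1) (answer + 1)
  else answer
termination_by coupon.toNat
decreasing_by omega

def solution (chicken : Int) : Int :=
  let (answer, coupon) := solutionLoop1 (chicken.natAbs + 1) chicken 0 0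
  solutionLoop2 coupon answer

-- ===== PORT B =====
def solution_alt (chicken : Int) : Int :=
  if chicken = 0 then 0 else PySem.Int.floordiv (chicken - 1) 9

-- ===== PRECONDITION & SPEC =====
-- Pre_ excludes chicken < 0: there A's first while loop never terminates
-- (chicken //= 10 stays at -1 forever), so A returns on exactly these inputs.
def Pre_solution (chicken : Int) : Prop := 0 ≤ chicken
instance (chicken : Int) : Decidable (Pre_solution chicken) := by unfold Pre_solution; infer_instance
def pvWitness_solution : Int := (100)

def Spec_solution (chicken : Int) (out : Int) : Prop := out = solution_alt chicken
instance (chicken : Int) (out : Int) : Decidable (Spec_solution chicken out) := by unfold Spec_solution; infer_instance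

-- ===== CLAIM (what is proved, stated in full; the proofs are below) =====
def Claim_equal_solution : Prop := ∀ (chicken : Int), Dom_solution chicken → Pre_solution chicken → Spec_solution chicken (solution chicken)

-- ===== LEMMAS AND PROOFS =====

-- Invariant of the first loop: it preserves 9*answer + coupon + chicken, never
-- decreases coupon, and increases coupon when chicken ≥ 1.
theorem solutionLoop1_inv (fuel : Nat) (n a c : Int) (hn : 0 ≤ n) (hf : n < (fuel : Int)) :
    9 * (solutionLoop1 fuel n a c).1 + (solutionLoop1 fuel n a c).2 = 9 * a + c + n ∧
    c ≤ (solutionLoop1 fuel n a c).2 ∧ (1 ≤ n → c + 1 ≤ (solutionLoop1 fuel n a c).2) := by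
  induction fuel generalizing n a c with
  | zero => simp at hf; omega
  | succ fuel ih =>
    by_cases h0 : n = 0
    · simp [solutionLoop1, h0]
    · have hn1 : 1 ≤ n := by omega
      have hq : PySem.Int.floordiv n 10 = n / 10 :=
        PySem.Int.floordiv_eq_ediv_of_pos (by omega)
      have hr : PySem.Int.mod n 10 = n % 10 :=
        PySem.Int.mod_eq_emod_of_pos (by omega)
      simp only [solutionLoop1, h0, if_false, hq, hr]
      have hdiv : n / 10 * 10 + n % 10 = n := by omega
      have hrlo : 0 ≤ n % 10 := by omega
      have hrhi : n % 10 < 10 := by omega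
      have hqlo : 0 ≤ n / 10 := by omega
      have hqlt : n / 10 < n := by omega
      obtain ⟨h1, h2, h3⟩ := ih (n / 10) (a + n / 10) (c + n % 10) hqlo (by push_cast at hf ⊢; omega)
      refine ⟨by omega, by omega, fun _ => ?_⟩
      by_cases hq1 : 1 ≤ n / 10
      · have := h3 hq1; omega
      · -- n / 10 = 0, so n ∈ [1,9] and n % 10 = n ≥ 1
        have : n / 10 = 0 := by omega
        have : n % 10 = n := by omega
        omega

-- Closed form of the second loop.
theorem solutionLoop2_eq (c a : Int) :
    solutionLoop2 c a = if 10 ≤ c then a + (c - 1) / 9 else a := by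
  by_cases h : 10 ≤ c
  · rw [solutionLoop2, dif_pos h, solutionLoop2_eq (c - 10 + 1) (a + 1)]
    simp only [h, if_true]
    by_cases h2 : 10 ≤ c - 10 + 1
    · simp only [h2, if_true]
      have : c - 10 + 1 - 1 = (c - 10) := by ring
      rw [this]
      have h9 : c - 1 = (c - 10) + 1 * 9 := by ring
      rw [h9, Int.add_mul_ediv_right _ _ (by omega)]
      ring
    · simp only [h2, if_false]
      have : (c - 1) / 9 = 1 := by omega
      omega
  · rw [solutionLoop2, dif_neg h]
    simp [h]
termination_by c.toNat
decreasing_by omega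

-- ===== VERDICT (by name: the statement is the Claim_ definition above) =====
theorem solution_spec : Claim_equal_solution := by
  intro n _ hpre
  unfold Spec_solution
  by_cases h0 : n = 0
  · subst h0
    unfold solution solution_alt
    norm_num [solutionLoop1, solutionLoop2_eq]
  · have hpre' : (0:Int) ≤ n := hpre
    have hn1 : (1:Int) ≤ n := by omega
    obtain ⟨h1, h2, h3⟩ := solutionLoop1_inv (n.natAbs + 1) n 0 0 hpre' (by omega)
    unfold solution solution_alt
    rcases hq : solutionLoop1 (n.natAbs + 1) n 0 0 with ⟨a, c⟩
    rw [hq] at h1 h2 h3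
    simp only at h1 h2 h3
    show solutionLoop2 c a = _
    rw [solutionLoop2_eq]
    have hc1 : 1 ≤ c := by have := h3 hn1; omega
    have hfd : PySem.Int.floordiv (n - 1) 9 = (n - 1) / 9 :=
      PySem.Int.floordiv_eq_ediv_of_pos (by omega)
    rw [hfd]
    have hsplit : (n - 1) / 9 = a + (c - 1) / 9 := by
      have h9 : n - 1 = (c - 1) + a * 9 := by omega
      rw [h9, Int.add_mul_ediv_right _ _ (by omega)]
      ring
    by_cases hc10 : 10 ≤ c
    · simp only [hc10, if_true, h0, if_false]
      omega
    · have : (c - 1) / 9 = 0 := by omega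
      simp only [hc10, if_false, h0]
      omega
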